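-- pv_equiv track=rewrite | github.com/vi1801/Python_Practice_Leetcode | Python Progs/zigzag_triples.py | zigzag_triples
-- ===== SOURCE A (Python) =====
-- def zigzag_triples(numbers):
--     # Initialize the result array of length len(numbers) - 2
--     result = [0] * (len(numbers) - 2)
--
--     # Iterate over the numbers array and check triples
--     for i in range(len(numbers) - 2):
--         a, b, c = numbers[i], numbers[i + 1], numbers[i + 2]
--
--         # Check if the triple (a, b, c) forms a zigzag pattern
--         if (a < b > c) or (a > b < c):
--             result[i] = 1
--         else:
--             result[i] = 0
--
--     return result
-- ===== SOURCE B (Python) =====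
-- def zigzag_triples(numbers):
--     d = [numbers[i + 1] - numbers[i] for i in range(len(numbers) - 1)]
--     return [1 if d[i] * d[i + 1] < 0 else 0 for i in range(len(d) - 1)]
-- ===== Notes on version B (the rewrite author's own statement) =====
-- stated objective: alternative
-- what changed: B first builds the array of consecutive differences, then marks a position 1 exactly when the product of its two adjacent differences is negative, instead of comparing each triple directly and writing into a preallocated result array.
import Mathlib
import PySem

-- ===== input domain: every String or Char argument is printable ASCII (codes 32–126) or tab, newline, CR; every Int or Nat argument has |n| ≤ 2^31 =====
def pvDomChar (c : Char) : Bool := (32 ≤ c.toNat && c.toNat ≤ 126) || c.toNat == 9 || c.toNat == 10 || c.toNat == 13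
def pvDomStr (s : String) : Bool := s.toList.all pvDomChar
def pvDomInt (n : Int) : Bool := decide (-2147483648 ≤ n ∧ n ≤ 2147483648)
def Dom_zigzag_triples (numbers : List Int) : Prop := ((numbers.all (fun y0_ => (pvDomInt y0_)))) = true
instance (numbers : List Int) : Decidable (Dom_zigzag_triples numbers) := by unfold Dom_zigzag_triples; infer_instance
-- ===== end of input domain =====

-- B marks a triple via the sign of the product of the two consecutive differences instead of
-- comparing the triple directly; an alternative decomposition, same cost.

-- ===== PORT A =====
-- result = [0]*(len-2); for i in range(len-2): read the triple, write 1 or 0 at index i.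
def zigzag_triples (numbers : List Int) : List Int :=
  (List.range (numbers.length - 2)).foldl
    (fun result i =>
      let a := numbers.getD i 0
      let b := numbers.getD (i + 1) 0
      let c := numbers.getD (i + 2) 0
      result.set i (if (a < b ∧ b > c) ∨ (a > b ∧ b < c) then 1 else 0))
    (List.replicate (numbers.length - 2) 0)

-- ===== PORT B =====
-- d = consecutive differences; output 1 where d[i]*d[i+1] < 0.
def zigzag_triples_alt (numbers : List Int) : List Int :=
  let d := (List.range (numbers.length - 1)).map
    (fun i => numbers.getD (i + 1) 0 - numbers.getD i 0)
  (List.range (d.length - 1)).map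
    (fun i => if d.getD i 0 * d.getD (i + 1) 0 < 0 then 1 else 0)

-- ===== PRECONDITION & SPEC =====
def Spec_zigzag_triples (numbers : List Int) (out : List Int) : Prop := out = zigzag_triples_alt numbers
instance (numbers : List Int) (out : List Int) : Decidable (Spec_zigzag_triples numbers out) := by unfold Spec_zigzag_triples; infer_instance

-- ===== CLAIM (what is proved, stated in full; the proofs are below) =====
def Claim_equal_zigzag_triples : Prop := ∀ (numbers : List Int), Dom_zigzag_triples numbers → Spec_zigzag_triples numbers (zigzag_triples numbers)

-- ===== LEMMAS AND PROOFS =====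

-- A's loop "write f i at index i" run over a list at least n long rewrites its n-prefix to map f (range n).
theorem foldl_set_range (f : Nat → Int) (n : Nat) (l : List Int) (h : n ≤ l.length) :
    (List.range n).foldl (fun r i => r.set i (f i)) l = (List.range n).map f ++ l.drop n := by
  induction n with
  | zero => simp
  | succ m ih =>
    have hm : m < l.length := h
    rw [List.range_succ, List.foldl_append, ih (Nat.le_of_lt hm), List.foldl_cons, List.foldl_nil]
    have hlen : ((List.range m).map f).length = m := by simp
    have : ((List.range m).map f ++ l.drop m).set m (f m)
        = (List.range m).map f ++ (l.drop m).set 0 (f m) := by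
      rw [← hlen]; simp
    rw [this]
    simp
    rw [List.drop_eq_getElem_cons hm, List.set_cons_zero]

theorem zigzag_triples_spec : Claim_equal_zigzag_triples := by
  intro numbers _
  unfold Spec_zigzag_triples zigzag_triples zigzag_triples_alt
  rw [foldl_set_range _ _ _ (by simp)]
  simp only [List.drop_replicate, Nat.sub_self, List.replicate_zero,
    List.append_nil, List.length_map, List.length_range]
  apply List.map_congr_left
  intro i hi
  have hi2 : i < numbers.length - 2 := List.mem_range.mp hi
  have h1 : i < numbers.length - 1 := by omega
  have h2 : i + 1 < numbers.length - 1 := by omega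
  have gd : ∀ j, j < numbers.length - 1 →
      ((List.range (numbers.length - 1)).map
        (fun k => numbers.getD (k + 1) 0 - numbers.getD k 0)).getD j 0
      = numbers.getD (j + 1) 0 - numbers.getD j 0 := by
    intro j hj
    rw [List.getD_eq_getElem?_getD]
    simp [hj]
  rw [gd i h1, gd (i + 1) h2]
  set a := numbers.getD i 0
  set b := numbers.getD (i + 1) 0
  set c := numbers.getD (i + 2) 0
  have : (b - a) * (c - (b)) < 0 ↔ (a < b ∧ b > c) ∨ (a > b ∧ b < c) := by
    rw [mul_neg_iff]; constructor <;> intro h <;> [skip; skip] <;> omega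
  simp only [this]
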